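-- pv_equiv track=rewrite | github.com/BFl47/1.1.Fondamenti-di-Informatica-I | 3.Esami/Esame20210624/Soluzioni/Python/Ex1.py | Ex1
-- ===== SOURCE A (Python) =====
-- def Ex1(l):
--     ris=list() # lista risultato
--     for i in range(len(l)-1):
--         l1=l[i+1:len(l)]
--         m=max(l1)
--         if l[i]<m:
--             ris.append(l[i])
--     if len(l)>0:
--         ris.append(l[-1])
--     return ris
--     """MODIFICARE IL CONTENUTO DI QUESTA FUNZIONE PER SVOLGERE L'ESERCIZIO"""
-- ===== SOURCE B (Python) =====
-- def Ex1(l):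
--     if not l:
--         return []
--     m = l[-1]
--     ris = [m]
--     for x in reversed(l[:-1]):
--         if x < m:
--             ris.append(x)
--         if x > m:
--             m = x
--     ris.reverse()
--     return ris
-- ===== Notes on version B (the rewrite author's own statement) =====
-- stated objective: faster
-- what changed: B replaces A's per-index recomputation of max(l[i+1:]) by a single right-to-left pass that maintains a running suffix maximum while collecting kept elements, reversing once at the end.
import Mathlib
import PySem

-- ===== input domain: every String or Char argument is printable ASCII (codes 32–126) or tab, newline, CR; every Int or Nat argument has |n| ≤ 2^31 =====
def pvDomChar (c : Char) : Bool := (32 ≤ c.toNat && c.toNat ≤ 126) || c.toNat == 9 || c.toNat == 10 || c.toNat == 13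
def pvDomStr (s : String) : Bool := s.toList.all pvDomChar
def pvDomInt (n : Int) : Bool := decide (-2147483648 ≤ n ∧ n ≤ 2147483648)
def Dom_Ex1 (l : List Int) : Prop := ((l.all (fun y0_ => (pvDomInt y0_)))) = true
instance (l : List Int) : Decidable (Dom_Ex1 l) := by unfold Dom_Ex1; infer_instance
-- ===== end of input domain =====

-- B replaces A's per-index recomputation of max(l[i+1:]) by one right-to-left pass with a
-- running suffix maximum (objective: faster, O(n) instead of O(n^2)).

-- ===== PORT A =====
-- loop body of A: 'l1 = l[i+1:len(l)]; m = max(l1); if l[i] < m: ris.append(l[i])'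
-- (max of an empty list would raise in Python; the 'none' arm is unreachable for i in range(len(l)-1))
def Ex1Body (l : List Int) (ris : List Int) (i : Int) : List Int :=
  let l1 := PySem.List.slice l (some (i + 1)) (some (l.length : Int))
  match PySem.List.max? l1 (fun y => y) with
  | some m => if PySem.List.pyGetD l i 0 < m then ris ++ [PySem.List.pyGetD l i 0] else ris
  | none => ris

def Ex1 (l : List Int) : List Int :=
  let ris : List Int := (PySem.List.pyRange 0 ((l.length : Int) - 1) 1).foldl (Ex1Body l) []
  if (l.length : Int) > 0 then ris ++ [PySem.List.pyGetD l (-1) 0] else ris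

-- ===== PORT B =====
-- loop body of B: 'if x < m: ris.append(x); if x > m: m = x' on state (ris, m)
def Ex1AltStep (p : List Int × Int) (x : Int) : List Int × Int :=
  (if x < p.2 then p.1 ++ [x] else p.1, if x > p.2 then x else p.2)

def Ex1_alt (l : List Int) : List Int :=
  if l = [] then []
  else
    let m := PySem.List.pyGetD l (-1) 0
    let p := (PySem.List.slice l none (some (-1))).reverse.foldl Ex1AltStep ([m], m)
    p.1.reverse

-- ===== PRECONDITION & SPEC =====
def Spec_Ex1 (l : List Int) (out : List Int) : Prop := out = Ex1_alt l
instance (l : List Int) (out : List Int) : Decidable (Spec_Ex1 l out) := by unfold Spec_Ex1; infer_instance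

-- ===== CLAIM (what is proved, stated in full; the proofs are below) =====
def Claim_equal_Ex1 : Prop := ∀ (l : List Int), Dom_Ex1 l → Spec_Ex1 l (Ex1 l)

-- ===== LEMMAS AND PROOFS =====

-- Python's max of a nonempty list (value for [] irrelevant, never used)
def pvMaxOf : List Int → Int
  | [] => 0
  | x :: t => t.foldl max x

-- the common characterization: keep l[i] iff it is < max of the strict suffix; keep the last element
def pvSfx : List Int → List Int
  | [] => []
  | [x] => [x]
  | x :: y :: t => (if x < pvMaxOf (y :: t) then [x] else []) ++ pvSfx (y :: t)

theorem pvMaxOf_cons (x : Int) (y : Int) (t : List Int) :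
    pvMaxOf (x :: y :: t) = max x (pvMaxOf (y :: t)) := by
  show (y :: t).foldl max x = max x (t.foldl max y)
  show t.foldl max (max x y) = _
  exact List.foldl_assoc

theorem pvBfold (l : List Int) (hl : l ≠ []) :
    l.dropLast.reverse.foldl Ex1AltStep ([l.getLast hl], l.getLast hl)
      = ((pvSfx l).reverse, pvMaxOf l) := by
  induction l with
  | nil => exact absurd rfl hl
  | cons x t ih =>
    cases t with
    | nil => simp [pvSfx, pvMaxOf]
    | cons y t' =>
      have ht : y :: t' ≠ [] := by simp
      have hlast : (x :: y :: t').getLast hl = (y :: t').getLast ht := by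
        simp [List.getLast_cons]
      have hdrop : (x :: y :: t').dropLast = x :: (y :: t').dropLast := by
        simp [List.dropLast]
      rw [hdrop, hlast]
      rw [show (x :: (y :: t').dropLast).reverse = (y :: t').dropLast.reverse ++ [x] by simp]
      rw [List.foldl_append, ih ht]
      show Ex1AltStep ((pvSfx (y :: t')).reverse, pvMaxOf (y :: t')) x = _
      unfold Ex1AltStep
      rw [pvMaxOf_cons]
      show (_, _) = ((pvSfx (x :: y :: t')).reverse, _)
      unfold pvSfx
      rcases lt_trichotomy x (pvMaxOf (y :: t')) with h | h | h
      · simp [h, not_lt.mpr (le_of_lt h), max_eq_right (le_of_lt h)]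
        cases t' <;> rfl
      · simp [h]
        cases t' <;> rfl
      · simp [not_lt.mpr (le_of_lt h), h, max_eq_left (le_of_lt h)]
        cases t' <;> rfl

theorem pvAlt_eq_sfx (l : List Int) : Ex1_alt l = pvSfx l := by
  cases l with
  | nil => rfl
  | cons x t =>
    have hl : x :: t ≠ [] := by simp
    unfold Ex1_alt
    rw [if_neg hl]
    dsimp only
    rw [PySem.List.slice_to_neg_one]
    rw [show PySem.List.pyGetD (x :: t) (-1) 0 = (x :: t).getLast hl from
      PySem.List.pyGetD_neg_one (x :: t) 0 hl]
    rw [pvBfold (x :: t) hl]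
    simp

-- accumulator pull-out for A's loop
theorem pvPull (l : List Int) (r : List Int) (acc : List Int) :
    r.foldl (Ex1Body l) acc = acc ++ r.foldl (Ex1Body l) [] := by
  induction r generalizing acc with
  | nil => simp
  | cons i r ih =>
    have hb : ∀ a : List Int, Ex1Body l a i = a ++ Ex1Body l [] i := by
      intro a
      unfold Ex1Body
      cases hm : PySem.List.max? (PySem.List.slice l (some (i + 1)) (some (l.length : Int)))
          (fun y => y) with
      | none => simp [hm]
      | some m =>
        simp only [hm]
        split_ifs <;> simp
    rw [List.foldl_cons, List.foldl_cons, ih, ih (Ex1Body l [] i), hb, List.append_assoc]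

-- the loop over range(1, len(l)-1) on l = x :: t is the tail's loop over range(0, len(t)-1)
theorem pvShift (x : Int) (t : List Int) (acc : List Int) :
    (PySem.List.pyRange 1 (t.length : Int) 1).foldl (Ex1Body (x :: t)) acc
      = (PySem.List.pyRange 0 ((t.length : Int) - 1) 1).foldl (Ex1Body t) acc := by
  rw [PySem.List.pyRange_one 1 (t.length : Int),
      PySem.List.pyRange_one 0 ((t.length : Int) - 1)]
  rw [show (t.length : Int) - 1 - 0 = (t.length : Int) - 1 from by ring]
  rw [List.foldl_map, List.foldl_map]
  apply PySem.List.foldl_congr_mem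
  intro acc k _
  show Ex1Body (x :: t) acc (1 + (k : Int)) = Ex1Body t acc (0 + (k : Int))
  have h1 : PySem.List.pyGetD (x :: t) (1 + (k : Int)) 0 = PySem.List.pyGetD t ((0 : Int) + k) 0 := by
    rw [show (1 + (k : Int)) = (((k + 1 : Nat)) : Int) from by push_cast; ring,
        show ((0 : Int) + k) = ((k : Nat) : Int) from by ring]
    rw [PySem.List.pyGetD_natCast, PySem.List.pyGetD_natCast]
    simp [List.getD]
  have h2 : PySem.List.slice (x :: t) (some (1 + (k : Int) + 1)) (some ((x :: t).length : Int))
      = PySem.List.slice t (some ((0 : Int) + k + 1)) (some (t.length : Int)) := by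
    rw [show (1 + (k : Int) + 1) = (((k + 2 : Nat)) : Int) from by push_cast; ring,
        show ((0 : Int) + k + 1) = (((k + 1 : Nat)) : Int) from by push_cast; ring,
        show (((x :: t).length : Int)) = (((t.length + 1 : Nat)) : Int) from by simp]
    rw [PySem.List.slice_natCast, PySem.List.slice_natCast]
    have hd : (x :: t).drop (k + 2) = t.drop (k + 1) := rfl
    rw [hd]
    congr 1
    omega
  unfold Ex1Body
  rw [h1, h2]

theorem pvA_eq_sfx (l : List Int) : Ex1 l = pvSfx l := by
  induction l with
  | nil => rfl
  | cons x t ih =>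
    cases t with
    | nil =>
      show Ex1 [x] = [x]
      unfold Ex1
      dsimp only
      rw [show ((([x] : List Int).length : Int) - 1) = 0 from by simp]
      rw [PySem.List.pyRange_one_eq_nil (by omega)]
      rw [show PySem.List.pyGetD [x] (-1) 0 = ([x].getLast (by simp)) from
        PySem.List.pyGetD_neg_one [x] 0 (by simp)]
      simp
    | cons y t' =>
      have ht : (y :: t') ≠ [] := by simp
      unfold Ex1
      dsimp only
      rw [show (((x :: y :: t').length : Int) - 1) = (((y :: t').length : Int)) from by
        push_cast [List.length_cons]; ring]
      rw [PySem.List.pyRange_one_cons (by exact_mod_cast Nat.succ_pos _)]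
      rw [List.foldl_cons]
      have hacc : Ex1Body (x :: y :: t') [] 0
          = if x < pvMaxOf (y :: t') then [x] else [] := by
        unfold Ex1Body
        dsimp only
        rw [show ((0 : Int) + 1) = (((1 : Nat)) : Int) from by norm_num]
        rw [PySem.List.slice_natCast]
        rw [show ((x :: y :: t').drop 1).take ((x :: y :: t').length - 1) = y :: t' from by simp]
        rw [PySem.List.max?_id_cons]
        rw [PySem.List.pyGetD_zero_cons]
        rfl
      rw [hacc]
      rw [show ((0 : Int) + 1) = 1 from by norm_num]
      rw [pvShift, pvPull]
      have htail : PySem.List.pyGetD (x :: y :: t') (-1) 0 = PySem.List.pyGetD (y :: t') (-1) 0 := by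
        rw [PySem.List.pyGetD_neg_one (x :: y :: t') 0 (by simp),
            PySem.List.pyGetD_neg_one (y :: t') 0 ht]
        simp [List.getLast_cons]
      have hEx1t : Ex1 (y :: t')
          = (PySem.List.pyRange 0 (((y :: t').length : Int) - 1) 1).foldl (Ex1Body (y :: t')) []
            ++ [PySem.List.pyGetD (y :: t') (-1) 0] := by
        unfold Ex1
        dsimp only
        rw [if_pos (by exact_mod_cast Nat.succ_pos _)]
      rw [if_pos (by exact_mod_cast Nat.succ_pos _), htail, List.append_assoc, ← hEx1t, ih]
      cases t' <;> rfl

theorem Ex1_spec : Claim_equal_Ex1 := by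
  intro l _
  unfold Spec_Ex1
  rw [pvA_eq_sfx, pvAlt_eq_sfx]
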